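-- pv_equiv track=rewrite | github.com/nos1609/wg-atelier | generate_wg_configs.py | allocate_subnet_indices
-- ===== SOURCE A (Python) =====
-- def allocate_subnet_indices(subnets, existing_indices):
--     """RU: Назначает индексы подсетей, сохраняя старые и заполняя свободные.
--        EN: Assigns subnet indices, keeping existing ones and filling gaps."""
--     subnet_indices = {}
--     used = set(existing_indices.values())
--     next_idx = 1
--     for subnet in subnets:
--         name = subnet["name"]
--         if name in existing_indices:
--             subnet_indices[name] = existing_indices[name]
--             continue
--         while next_idx in used:
--             next_idx += 1
--         subnet_indices[name] = next_idx
--         used.add(next_idx)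
--         next_idx += 1
--     return subnet_indices
-- ===== SOURCE B (Python) =====
-- def allocate_subnet_indices(subnets, existing_indices):
--     """RU: Назначает индексы подсетей, сохраняя старые и заполняя свободные.
--        EN: Assigns subnet indices, keeping existing ones and filling gaps."""
--     used = set(existing_indices.values())
--     need = sum(1 for s in subnets if s["name"] not in existing_indices)
--     # pool of free indices, precomputed in closed form: range(1, len(used)+need+1)
--     # is guaranteed to contain at least `need` integers outside `used`
--     free = [i for i in range(1, len(used) + need + 1) if i not in used]
--     result = {}
--     pos = 0
--     for s in subnets:
--         name = s["name"]
--         if name in existing_indices: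
--             result[name] = existing_indices[name]
--         else:
--             result[name] = free[pos]
--             pos += 1
--     return result
-- ===== Notes on version B (the rewrite author's own statement) =====
-- stated objective: alternative
-- what changed: A allocates on demand with a while-loop counter that skips a mutating used-set; B precomputes the whole pool of free indices as a single filtered range (no while loop, no set mutation) and the main loop just consumes the pool by position.
import Mathlib
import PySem

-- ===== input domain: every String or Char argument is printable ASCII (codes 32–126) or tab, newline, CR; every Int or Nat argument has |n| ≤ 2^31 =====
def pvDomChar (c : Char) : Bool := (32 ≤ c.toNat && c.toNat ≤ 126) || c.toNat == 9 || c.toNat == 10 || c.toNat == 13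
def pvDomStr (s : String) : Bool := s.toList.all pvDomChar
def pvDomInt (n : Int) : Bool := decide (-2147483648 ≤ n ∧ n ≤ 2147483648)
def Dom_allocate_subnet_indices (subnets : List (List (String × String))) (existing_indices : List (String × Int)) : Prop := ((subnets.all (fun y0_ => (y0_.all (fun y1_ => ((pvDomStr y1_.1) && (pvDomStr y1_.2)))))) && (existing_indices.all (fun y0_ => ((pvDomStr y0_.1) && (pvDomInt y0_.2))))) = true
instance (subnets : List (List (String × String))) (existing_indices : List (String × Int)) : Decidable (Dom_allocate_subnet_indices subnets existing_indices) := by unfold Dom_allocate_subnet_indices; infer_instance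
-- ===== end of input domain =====

-- B replaces A's on-demand while-loop allocation (a counter skipping a mutating used-set)
-- by precomputing the whole pool of free indices as one filtered range and consuming it by
-- position; objective: alternative structure, same cost.

-- ===== PORT A =====

-- subnet["name"] (total form; Pre_ guarantees the key is present, where Python would raise KeyError)
def pvName (s : List (String × String)) : String :=
  ((PySem.Dict.ofList s).get? "name").getD ""

-- `while next_idx in used: next_idx += 1` — fuel `used.length` is exact: the loop can
-- consume at most `used.length` distinct integers next_idx, next_idx+1, … from `used`.
def pvSkip : Nat → PySem.Set Int → Int → Int
  | 0, _, n => n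
  | f + 1, used, n => if n ∈ used then pvSkip f used (n + 1) else n

-- one iteration of A's `for subnet in subnets` loop over the state (subnet_indices, used, next_idx)
def pvStepA (ed : PySem.Dict String Int)
    (st : PySem.Dict String Int × PySem.Set Int × Int) (subnet : List (String × String)) :
    PySem.Dict String Int × PySem.Set Int × Int :=
  match ed.get? (pvName subnet) with
  | some v => (st.1.insert (pvName subnet) v, st.2.1, st.2.2)
  | none =>
      (st.1.insert (pvName subnet) (pvSkip st.2.1.length st.2.1 st.2.2),
       PySem.Set.add st.2.1 (pvSkip st.2.1.length st.2.1 st.2.2),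
       pvSkip st.2.1.length st.2.1 st.2.2 + 1)

def allocate_subnet_indices (subnets : List (List (String × String))) (existing_indices : List (String × Int)) : List (String × Int) :=
  let ed := PySem.Dict.ofList existing_indices
  (subnets.foldl (pvStepA ed) (PySem.Dict.empty, PySem.Set.ofList ed.values, 1)).1.items

-- ===== PORT B =====

-- one iteration of B's loop over the state (result, pos); free is the precomputed pool
-- (`free[pos]` is total here via getD 0: the pool is provably long enough, see the lemmas)
def pvStepB (ed : PySem.Dict String Int) (free : List Int)
    (st : PySem.Dict String Int × Int) (subnet : List (String × String)) :
    PySem.Dict String Int × Int :=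
  match ed.get? (pvName subnet) with
  | some v => (st.1.insert (pvName subnet) v, st.2)
  | none => (st.1.insert (pvName subnet) ((PySem.List.pyGet? free st.2).getD 0), st.2 + 1)

def allocate_subnet_indices_alt (subnets : List (List (String × String))) (existing_indices : List (String × Int)) : List (String × Int) :=
  let ed := PySem.Dict.ofList existing_indices
  let used := PySem.Set.ofList ed.values
  let need := (subnets.filter (fun s => !(ed.contains (pvName s)))).length
  let free := (PySem.List.pyRange 1 ((used.length : Int) + (need : Int) + 1) 1).filter
    (fun i => !(PySem.Set.contains used i))
  (subnets.foldl (pvStepB ed free) (PySem.Dict.empty, 0)).1.items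

-- ===== PRECONDITION & SPEC =====
-- Pre_ excludes exactly the inputs where some subnet dict has no "name" key: there A raises KeyError.
def Pre_allocate_subnet_indices (subnets : List (List (String × String))) (existing_indices : List (String × Int)) : Prop :=
  ∀ s ∈ subnets, ((PySem.Dict.ofList s).get? "name").isSome
instance (subnets : List (List (String × String))) (existing_indices : List (String × Int)) : Decidable (Pre_allocate_subnet_indices subnets existing_indices) := by unfold Pre_allocate_subnet_indices; infer_instance

def pvWitness_allocate_subnet_indices : (List (List (String × String))) × (List (String × Int)) :=
  ([[("name", "wg0")], [("name", "wg1")], [("name", "wg2")]], [("wg1", 1)])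

def Spec_allocate_subnet_indices (subnets : List (List (String × String))) (existing_indices : List (String × Int)) (out : List (String × Int)) : Prop := out = allocate_subnet_indices_alt subnets existing_indices
instance (subnets : List (List (String × String))) (existing_indices : List (String × Int)) (out : List (String × Int)) : Decidable (Spec_allocate_subnet_indices subnets existing_indices out) := by unfold Spec_allocate_subnet_indices; infer_instance

-- ===== CLAIM (what is proved, stated in full; the proofs are below) =====
def Claim_equal_allocate_subnet_indices : Prop := ∀ (subnets : List (List (String × String))) (existing_indices : List (String × Int)), Dom_allocate_subnet_indices subnets existing_indices → Pre_allocate_subnet_indices subnets existing_indices → Spec_allocate_subnet_indices subnets existing_indices (allocate_subnet_indices subnets existing_indices)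

-- ===== LEMMAS AND PROOFS =====

-- the free pool seen from position `a`: the integers of [a, M) not in `used`
def pvFree (used : PySem.Set Int) (a M : Int) : List Int :=
  (PySem.List.pyRange a M 1).filter (fun i => !(PySem.Set.contains used i))

theorem pvSkip_of_not_mem (f : Nat) (used : PySem.Set Int) (a : Int) (h : a ∉ used) :
    pvSkip f used a = a := by
  cases f <;> simp [pvSkip, h]

theorem pv_cnt_split (a : Int) (used : List Int) (hn : used.Nodup) (hm : a ∈ used) :
    (used.filter (fun x => a ≤ x)).length = (used.filter (fun x => a + 1 ≤ x)).length + 1 := by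
  induction used with
  | nil => cases hm
  | cons y t ih =>
      rcases List.mem_cons.mp hm with rfl | hmt
      · have hy : a ∉ t := (List.nodup_cons.mp hn).1
        have hfe : t.filter (fun x => a ≤ x) = t.filter (fun x => a + 1 ≤ x) := by
          apply List.filter_congr
          intro x hx
          have : x ≠ a := fun h => hy (h ▸ hx)
          simp only [decide_eq_decide]
          omega
        rw [List.filter_cons_of_pos (by simp), List.filter_cons_of_neg (by simp),
          hfe, List.length_cons]
      · have hya : y ≠ a := fun h => (List.nodup_cons.mp hn).1 (h ▸ hmt)
        have ht := ih (List.nodup_cons.mp hn).2 hmt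
        by_cases hy : a + 1 ≤ y
        · rw [List.filter_cons_of_pos (by simp; omega),
            List.filter_cons_of_pos (by simpa using hy), List.length_cons, List.length_cons, ht]
        · rw [List.filter_cons_of_neg (by simp; omega),
            List.filter_cons_of_neg (by simpa using hy), ht]

theorem pvSkip_fuel (f : Nat) : ∀ (g : Nat) (used : PySem.Set Int) (a : Int), used.Nodup →
    (used.filter (fun x => a ≤ x)).length ≤ f →
    (used.filter (fun x => a ≤ x)).length ≤ g →
    pvSkip f used a = pvSkip g used a := by
  induction f with
  | zero =>
      intro g used a hn hf _
      have ha : a ∉ used := by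
        intro hm
        have : a ∈ used.filter (fun x => a ≤ x) := List.mem_filter.mpr ⟨hm, by simp⟩
        have := List.length_pos_of_mem this
        omega
      rw [pvSkip_of_not_mem _ _ _ ha, pvSkip_of_not_mem _ _ _ ha]
  | succ f ih =>
      intro g used a hn hf hg
      by_cases ha : a ∈ used
      · have hsplit := pv_cnt_split a used hn ha
        have hg1 : 1 ≤ g := by omega
        obtain ⟨g', rfl⟩ := Nat.exists_eq_add_of_le hg1
        rw [show pvSkip (f+1) used a = pvSkip f used (a+1) by simp [pvSkip, ha],
            show pvSkip (1+g') used a = pvSkip g' used (a+1) by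
              rw [Nat.add_comm]; simp [pvSkip, ha]]
        exact ih g' used (a+1) hn (by omega) (by omega)
      · rw [pvSkip_of_not_mem _ _ _ ha, pvSkip_of_not_mem _ _ _ ha]

theorem pv_step_core (used : PySem.Set Int) (a M : Int) (hn : used.Nodup)
    (hne : pvFree used a M ≠ []) :
    pvFree used a M
      = pvSkip used.length used a
        :: pvFree (PySem.Set.add used (pvSkip used.length used a))
             (pvSkip used.length used a + 1) M := by
  have hmeas : ∀ n : Nat, ∀ a : Int, (M - a).toNat = n → pvFree used a M ≠ [] →
      pvFree used a M
        = pvSkip used.length used a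
          :: pvFree (PySem.Set.add used (pvSkip used.length used a))
               (pvSkip used.length used a + 1) M := by
    intro n
    induction n with
    | zero =>
        intro a h0 hne'
        exfalso; apply hne'
        unfold pvFree
        rw [show PySem.List.pyRange a M 1 = [] by
          rw [PySem.List.pyRange_one]
          simp [show (M - a).toNat = 0 from h0]]
        rfl
    | succ n ih =>
        intro a h0 hne'
        have haM : a < M := by omega
        have hcons : PySem.List.pyRange a M 1 = a :: PySem.List.pyRange (a+1) M 1 :=
          PySem.List.pyRange_one_cons haM
        by_cases ha : a ∈ used
        · -- a is used: the pool drops a, the skip walks past a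
          have hfilter : pvFree used a M = pvFree used (a+1) M := by
            unfold pvFree
            rw [hcons]
            simp [PySem.Set.contains, ha]
          have hsplit := pv_cnt_split a used hn ha
          have hlen1 : 1 ≤ used.length := List.length_pos_of_mem ha
          obtain ⟨f, hf⟩ := Nat.exists_eq_add_of_le hlen1
          have hskip : pvSkip used.length used a = pvSkip used.length used (a+1) := by
            rw [hf, Nat.add_comm, show pvSkip (f+1) used a = pvSkip f used (a+1) by
              simp [pvSkip, ha]]
            have hle : (used.filter (fun x => a ≤ x)).length ≤ used.length :=
              List.length_filter_le _ used
            exact pvSkip_fuel f (f+1) used (a+1) hn (by omega) (by omega)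
          rw [hfilter, hskip]
          exact ih (a+1) (by omega) (hfilter ▸ hne')
        · -- a is free: it is the head of the pool and the skip stops at a
          have hskip : pvSkip used.length used a = a := pvSkip_of_not_mem _ _ _ ha
          unfold pvFree
          rw [hcons, hskip, List.filter_cons_of_pos (by simp [PySem.Set.contains, ha])]
          congr 1
          apply List.filter_congr
          intro x hx
          have hxr := (PySem.List.mem_pyRange_one).mp hx
          have hxa : x ≠ a := by omega
          simp [PySem.Set.contains, PySem.Set.add, ha, hxa]
  exact hmeas (M - a).toNat a rfl hne

-- Set.add of a fresh element keeps the no-duplicates invariant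
theorem pv_nodup_add (used : PySem.Set Int) (x : Int) (hn : used.Nodup) :
    (PySem.Set.add used x).Nodup := by
  unfold PySem.Set.add
  split
  · exact hn
  · next h =>
    have hx : x ∉ used := by simpa [PySem.Set.contains] using h
    rw [List.nodup_append]
    refine ⟨hn, List.nodup_singleton x, ?_⟩
    intro a ha b hb hab
    have hbx : b = x := by simpa using hb
    exact hx (hbx ▸ hab ▸ ha)

-- MAIN INDUCTION: A's interleaved fold equals B's pool-consuming fold, under the
-- invariant that the pool suffix at `pos` is exactly pvFree of A's current state and
-- is long enough for the remaining missing names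
theorem pv_main (ed : PySem.Dict String Int) (M : Int) (free : List Int) :
    ∀ (t : List (List (String × String))) (d : PySem.Dict String Int)
      (used : PySem.Set Int) (next : Int) (pos : Nat),
    used.Nodup →
    free.drop pos = pvFree used next M →
    (t.filter (fun s => !(ed.contains (pvName s)))).length ≤ (pvFree used next M).length →
    (t.foldl (pvStepA ed) (d, used, next)).1
      = (t.foldl (pvStepB ed free) (d, (pos : Int))).1 := by
  intro t
  induction t with
  | nil => intro d used next pos _ _ _; rfl
  | cons s t ih =>
      intro d used next pos hn hdrop hlen
      by_cases hc : (ed.contains (pvName s)) = true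
      · rcases Option.isSome_iff_exists.mp
          (by rw [PySem.Dict.contains_eq_isSome_get?] at hc; exact hc) with ⟨v, hv⟩
        rw [List.foldl_cons, List.foldl_cons,
          show pvStepA ed (d, used, next) s = (d.insert (pvName s) v, used, next) by
            unfold pvStepA; rw [hv],
          show pvStepB ed free (d, (pos : Int)) s = (d.insert (pvName s) v, (pos : Int)) by
            unfold pvStepB; rw [hv]]
        refine ih _ used next pos hn hdrop ?_
        rw [List.filter_cons_of_neg (by simp [hc])] at hlen
        exact hlen
      · have hg : ed.get? (pvName s) = none := by
          rw [PySem.Dict.contains_eq_isSome_get?] at hc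
          exact Option.not_isSome_iff_eq_none.mp (by simpa using hc)
        rw [List.filter_cons_of_pos (by simp [hc]), List.length_cons] at hlen
        have hne : pvFree used next M ≠ [] := by
          intro h; rw [h, List.length_nil] at hlen; omega
        have hcore := pv_step_core used next M hn hne
        set i := pvSkip used.length used next with hi
        -- B's lookup free[pos] is the head of the pool
        have hget : (PySem.List.pyGet? free (pos : Int)).getD 0 = i := by
          have h1 : free[pos]? = some i := by
            rw [← List.head?_drop, hdrop, hcore]; rfl
          rw [PySem.List.pyGet?_natCast, h1]; rfl
        rw [List.foldl_cons, List.foldl_cons,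
          show pvStepA ed (d, used, next) s
            = (d.insert (pvName s) i, PySem.Set.add used i, i + 1) by
            unfold pvStepA; rw [hg],
          show pvStepB ed free (d, (pos : Int)) s
            = (d.insert (pvName s) i, (pos : Int) + 1) by
            unfold pvStepB; rw [hg, hget]]
        have hdrop' : free.drop (pos + 1) = pvFree (PySem.Set.add used i) (i + 1) M := by
          rw [← List.tail_drop, hdrop, hcore]; rfl
        have hlen' : (t.filter (fun s => !(ed.contains (pvName s)))).length
            ≤ (pvFree (PySem.Set.add used i) (i + 1) M).length := by
          have := congrArg List.length hcore
          simp only [List.length_cons] at this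
          omega
        rw [show ((pos : Int) + 1) = ((pos + 1 : Nat) : Int) by push_cast; ring]
        exact ih _ (PySem.Set.add used i) (i+1) (pos+1)
          (pv_nodup_add used i hn) hdrop' hlen'

-- pigeonhole: the pool [1, |used|+need+1) minus `used` has at least `need` elements
theorem pv_pool_big (used : PySem.Set Int) (need : Nat) :
    need ≤ (pvFree used 1 ((used.length : Int) + (need : Int) + 1)).length := by
  unfold pvFree
  set M : Int := (used.length : Int) + (need : Int) + 1 with hM
  set R := PySem.List.pyRange 1 M 1 with hR
  have hRlen : R.length = used.length + need := by
    rw [hR, PySem.List.length_pyRange_one]; omega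
  have hsplit := List.length_eq_length_filter_add (l := R)
    (fun i => !(PySem.Set.contains used i))
  have hsub : (R.filter (fun i => !(!(PySem.Set.contains used i)))).length ≤ used.length := by
    refine List.Subperm.length_le (List.Nodup.subperm ?_ ?_)
    · exact List.Nodup.filter _ (by rw [hR]; exact PySem.List.nodup_pyRange_one 1 M)
    · intro x hx
      have := (List.mem_filter.mp hx).2
      simpa [PySem.Set.contains] using this
  omega

-- ===== VERDICT (by name: the statement is the Claim_ definition above) =====
theorem allocate_subnet_indices_spec : Claim_equal_allocate_subnet_indices := by
  intro subnets existing_indices _ _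
  unfold Spec_allocate_subnet_indices allocate_subnet_indices allocate_subnet_indices_alt
  set ed := PySem.Dict.ofList existing_indices with hed
  set used := PySem.Set.ofList ed.values with hused
  set need := (subnets.filter (fun s => !(ed.contains (pvName s)))).length with hneed
  set M : Int := (used.length : Int) + (need : Int) + 1 with hM
  have hn : used.Nodup := PySem.Set.nodup_ofList _
  have := pv_main ed M (pvFree used 1 M) subnets PySem.Dict.empty used 1 0 hn
    (by simp) (pv_pool_big used need)
  exact congrArg PySem.Dict.items this
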